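-- pv_equiv track=rewrite | github.com/Yuzhe98/Yu0702 | NeedleinGalaxy/CASPEr/bracket2.py | exp_output
-- ===== SOURCE A (Python) =====
-- def exp_output(elements = ["A","B","C","D","E"]):
--     if len(elements)==1:
--         return elements
--     if len(elements)==2:
--         return ["("+elements[0]+elements[1]+")"]
--
--     exp1 = exp_output(elements[1:])
--     for i in range(len(exp1)):
--         exp1[i] = "("+elements[0]+exp1[i]+")"
--
--     exp0 = exp_output(elements[0:-1])
--     for i in range(len(exp1)):
--         exp0[i] = "("+exp0[i] + elements[-1]+")"
--     return exp1+exp0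
-- ===== SOURCE B (Python) =====
-- def exp_output(elements=["A", "B", "C", "D", "E"]):
--     # Interval DP: compute each contiguous subrange once (A recomputes them
--     # exponentially often through its two overlapping recursive calls).
--     n = len(elements)
--     dp = [[elements[i]] for i in range(n)]  # rows for length-1 subranges
--     for L in range(2, n + 1):
--         ndp = []
--         for i in range(n - L + 1):
--             if L == 2:
--                 ndp.append(["(" + elements[i] + elements[i + 1] + ")"])
--             else:
--                 left = ["(" + elements[i] + s + ")" for s in dp[i + 1]]
--                 right = ["(" + s + elements[i + L - 1] + ")" for s in dp[i]]
--                 ndp.append(left + right)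
--         dp = ndp
--     return dp[0]
-- ===== Notes on version B (the rewrite author's own statement) =====
-- stated objective: faster
-- what changed: Replaces A's exponentially overlapping double recursion (each contiguous subrange recomputed many times) with a bottom-up interval DP that builds the bracketings of every contiguous subrange exactly once, length by length; intended as faster, measured 3.09x at n=16 (the output itself is exponential in n, so both time out on large n).
import Mathlib
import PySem

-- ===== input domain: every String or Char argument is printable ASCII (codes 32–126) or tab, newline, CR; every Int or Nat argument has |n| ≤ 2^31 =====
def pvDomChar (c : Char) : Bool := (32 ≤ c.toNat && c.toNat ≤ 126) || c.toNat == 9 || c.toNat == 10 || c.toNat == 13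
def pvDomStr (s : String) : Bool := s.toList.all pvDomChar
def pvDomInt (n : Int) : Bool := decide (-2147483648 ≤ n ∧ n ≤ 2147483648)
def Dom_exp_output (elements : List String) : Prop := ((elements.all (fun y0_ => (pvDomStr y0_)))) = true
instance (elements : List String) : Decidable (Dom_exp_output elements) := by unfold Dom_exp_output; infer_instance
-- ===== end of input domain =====

-- B replaces A's exponentially overlapping double recursion by an interval DP
-- that computes each contiguous subrange once (intended as faster; measured 3.09x at n=16 —
-- the output itself is exponential in n, so both programs are exponential overall).

-- ===== PORT A =====
-- Literal port of A's recursion.  elements[1:] = tail, elements[0:-1] = dropLast,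
-- elements[-1] = getLastD (the branch guarantees nonemptiness, so the default is dead);
-- A's second loop runs over range(len(exp1)), which always equals len(exp0), so it
-- rewrites every element of exp0: a map.  On [] the Python recurses forever
-- (RecursionError); the port returns [] there, and [] is excluded by Pre_.
def exp_output : List String → List String
  | [] => []
  | [a] => [a]
  | [a, b] => ["(" ++ a ++ b ++ ")"]
  | a :: b :: c :: rest =>
      ((exp_output (b :: c :: rest)).map (fun s => "(" ++ a ++ s ++ ")"))
      ++ ((exp_output ((a :: b :: c :: rest).dropLast)).map
            (fun s => "(" ++ s ++ (a :: b :: c :: rest).getLastD "" ++ ")"))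
termination_by l => l.length
decreasing_by
  · simp
  · simp [List.length_dropLast]

-- ===== PORT B =====
-- One pass of Source B's inner 'for i' loop, at subrange length L (list indexing dp[i],
-- dp[i+1], elements[i], elements[i+L-1] is always in range; getD mirrors it exactly).
def bStep (elements : List String) (n : Nat) (dp : List (List String)) (L : Nat) :
    List (List String) :=
  (List.range (n - L + 1)).map (fun i =>
    if L = 2 then ["(" ++ elements.getD i "" ++ elements.getD (i + 1) "" ++ ")"]
    else ((dp.getD (i + 1) []).map (fun s => "(" ++ elements.getD i "" ++ s ++ ")"))
         ++ ((dp.getD i []).map (fun s => "(" ++ s ++ elements.getD (i + L - 1) "" ++ ")")))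

-- Source B: dp starts as the length-1 rows, then 'for L in range(2, n+1)' folds bStep;
-- the final 'return dp[0]' raises IndexError on the empty list (excluded by Pre_),
-- here getD returns [].
def exp_output_alt (elements : List String) : List String :=
  let n := elements.length
  let dp0 := (List.range n).map (fun i => [elements.getD i ""])
  ((List.range' 2 (n - 1)).foldl (bStep elements n) dp0).getD 0 []

-- ===== PRECONDITION & SPEC =====
-- Pre_ excludes only the empty list, on which A never returns (infinite recursion /
-- RecursionError) and Source B raises IndexError.
def Pre_exp_output (elements : List String) : Prop := elements ≠ []
instance (elements : List String) : Decidable (Pre_exp_output elements) := by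
  unfold Pre_exp_output; infer_instance
def pvWitness_exp_output : List String := (["A", "B", "C"])

def Spec_exp_output (elements : List String) (out : List String) : Prop := out = exp_output_alt elements
instance (elements : List String) (out : List String) : Decidable (Spec_exp_output elements out) := by unfold Spec_exp_output; infer_instance

-- ===== CLAIM (what is proved, stated in full; the proofs are below) =====
def Claim_equal_exp_output : Prop := ∀ (elements : List String), Dom_exp_output elements → Pre_exp_output elements → Spec_exp_output elements (exp_output elements)

-- ===== LEMMAS AND PROOFS =====

-- Unfolding A's port on a list of length ≥ 3 expressed through take/drop of a base list.
lemma exp_output_take (xs : List String) (L : Nat) (hL : 2 ≤ L) (h : L + 1 ≤ xs.length) :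
    exp_output (xs.take (L + 1)) =
      ((exp_output (xs.tail.take L)).map (fun s => "(" ++ xs.headD "" ++ s ++ ")"))
      ++ ((exp_output (xs.take L)).map (fun s => "(" ++ s ++ xs.getD L "" ++ ")")) := by
  obtain ⟨K, rfl⟩ : ∃ K, L = K + 2 := ⟨L - 2, by omega⟩
  match xs, h with
  | a :: b :: c :: rest, h =>
    have hK : K ≤ rest.length := by simpa using h
    have h1 : (a :: b :: c :: rest).take (K + 2 + 1) = a :: b :: c :: rest.take K := by
      simp
    have hlen : ((a :: b :: c :: rest).take (K + 2 + 1)).length = K + 3 := by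
      rw [h1]; simp [Nat.min_eq_left hK]
    have e2 : (a :: b :: c :: rest.take K).dropLast = (a :: b :: c :: rest).take (K + 2) := by
      rw [← h1, List.dropLast_eq_take, hlen]
      show List.take (K + 2) _ = _
      rw [List.take_take]
      simp
    have e3 : (a :: b :: c :: rest.take K).getLastD "" = (a :: b :: c :: rest).getD (K + 2) "" := by
      rw [← h1, List.getLastD_eq_getLast?, List.getLast?_eq_getElem?, hlen]
      show (((a :: b :: c :: rest).take (K + 2 + 1))[K + 2]?).getD "" = _
      rw [List.getElem?_take_of_lt (by omega)]
      simp [List.getD]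
    rw [h1, exp_output, e2, e3]
    simp
lemma getD_map_range {β : Type} (f : Nat → β) (m j : Nat) (d : β) (hj : j < m) :
    ((List.range m).map f).getD j d = f j := by
  simp [List.getD, hj]
-- The DP invariant: after folding lengths 2..L, row i of dp is A's value on
-- the subrange elements[i : i+L].
lemma dp_inv (elements : List String) (L : Nat) (h1 : 1 ≤ L) (hL : L ≤ elements.length) :
    (List.range' 2 (L - 1)).foldl (bStep elements elements.length)
        ((List.range elements.length).map (fun i => [elements.getD i ""]))
    = (List.range (elements.length - L + 1)).map
        (fun i => exp_output ((elements.drop i).take L)) := by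
  induction L with
  | zero => omega
  | succ M ih =>
    rcases Nat.eq_or_lt_of_le h1 with h1' | h1'
    · -- L = 1
      rw [← h1']
      simp only [Nat.sub_self, List.range'_zero, List.foldl_nil]
      have hn : elements.length - 1 + 1 = elements.length := by omega
      rw [hn]
      apply List.map_congr_left
      intro i hi
      rw [List.mem_range] at hi
      match hd : elements.drop i, (List.lt_length_drop (by omega : i + 0 < elements.length) : 0 < (elements.drop i).length) with
      | x :: t, _ =>
        have hx : elements[i]? = some x := by
          have h0 : (elements.drop i).head? = elements[i]? := List.head?_drop
          rw [hd] at h0; exact h0.symm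
        simp [List.getD, hx, exp_output]
    · -- L = M + 1 with M ≥ 1
      have hM1 : 1 ≤ M := by omega
      have hMn : M ≤ elements.length := by omega
      have hr : List.range' 2 (M + 1 - 1) = List.range' 2 (M - 1) ++ [M + 1] := by
        have : M + 1 - 1 = (M - 1) + 1 := by omega
        rw [this, List.range'_concat]
        congr 2
        omega
      rw [hr, List.foldl_append, List.foldl_cons, List.foldl_nil, ih hM1 hMn]
      show bStep elements elements.length _ (M + 1) = _
      unfold bStep
      apply List.map_congr_left
      intro i hi
      rw [List.mem_range] at hi
      have hin : i + (M + 1) ≤ elements.length := by omega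
      rcases Nat.eq_or_lt_of_le hM1 with hM' | hM'
      · -- M = 1 : length-2 case
        rw [← hM']
        match hd : elements.drop i, (List.lt_length_drop (by omega : i + 0 < elements.length) : 0 < (elements.drop i).length) with
        | x :: t, _ =>
          have hx : elements[i]? = some x := by
            have h0 : (elements.drop i).head? = elements[i]? := List.head?_drop
            rw [hd] at h0; exact h0.symm
          match ht : t, (by
              have := congrArg List.length hd
              simp [List.length_drop] at this
              omega : 0 < t.length) with
          | y :: t2, _ =>
            have hy : elements[i + 1]? = some y := by
              have h2 : (elements.drop i)[1]? = elements[i + 1]? := List.getElem?_drop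
              rw [hd] at h2
              simpa using h2.symm
            simp [hx, hy, exp_output]
      · -- M ≥ 2
        have hne : ¬ (M + 1 = 2) := by omega
        rw [if_neg hne]
        rw [getD_map_range _ _ _ _ (by omega), getD_map_range _ _ _ _ (by omega)]
        have key := exp_output_take (elements.drop i) M (by omega)
          (by rw [List.length_drop]; omega)
        rw [List.tail_drop] at key
        have hh : (elements.drop i).headD "" = elements.getD i "" := by
          have : (elements.drop i).head? = elements[i]? := List.head?_drop
          simp [List.getD, this]
        have hg : (elements.drop i).getD M "" = elements.getD (i + M) "" := by
          simp [List.getD, List.getElem?_drop]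
        rw [hh, hg] at key
        rw [key]
        have : i + (M + 1) - 1 = i + M := by omega
        rw [this]
-- ===== VERDICT (by name: the statement is the Claim_ definition above) =====
theorem exp_output_spec : Claim_equal_exp_output := by
  intro elements _ hpre
  unfold Spec_exp_output exp_output_alt
  have hn : 1 ≤ elements.length := by
    cases elements with
    | nil => exact absurd rfl hpre
    | cons a t => simp
  show exp_output elements =
    ((List.range' 2 (elements.length - 1)).foldl (bStep elements elements.length)
      ((List.range elements.length).map (fun i => [elements.getD i ""]))).getD 0 []
  rw [dp_inv elements elements.length hn le_rfl]
  simp
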